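-- pv_equiv track=rewrite | github.com/jlsknd/AOIS | lab2/minimization.py | _minimal_cover_exact
-- ===== SOURCE A (Python) =====
-- def _minimal_cover_exact(cells, rectangles):
--     if not cells:
--         return []
--     cell_index = {cell: i for i, cell in enumerate(cells)}
--     n = len(cells)
--     rect_masks = []
--     for rect in rectangles:
--         mask = 0
--         for cell in rect:
--             if cell in cell_index:
--                 mask |= 1 << cell_index[cell]
--         if mask != 0:
--             rect_masks.append(mask)
--     if not rect_masks:
--         return []
--
--     if len(rect_masks) > 30:
--         uncovered = (1 << n) - 1
--         cover = []
--         while uncovered: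
--             best_mask = 0
--             best_idx = -1
--             for i, mask in enumerate(rect_masks):
--                 covered = bin(mask & uncovered).count('1')
--                 if covered > best_mask:
--                     best_mask = covered
--                     best_idx = i
--             if best_idx == -1: break
--             cover.append(rectangles[best_idx])
--             uncovered &= ~rect_masks[best_idx]
--         return cover
--
--     best = None
--     best_size = n+1
--     k = len(rect_masks)
--     for subset in range(1 << k):
--         mask = 0
--         count = 0
--         for i in range(k):
--             if subset & (1 << i):
--                 mask |= rect_masks[i]
--                 count += 1
--         if mask == (1 << n) - 1:
--             if best is None or count < best_size:
--                 best = subset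
--                 best_size = count
--     if best is not None:
--         return [rectangles[i] for i in range(k) if best & (1 << i)]
--     return []
-- ===== SOURCE B (Python) =====
-- def _mask_of(cell_index, rect):
--     m = 0
--     for cell in rect:
--         i = cell_index.get(cell)
--         if i is not None:
--             m |= 1 << i
--     return m
--
--
-- def _greedy(rect_masks, rectangles, uncovered):
--     # greedy fallback (same selection rule as before: first index covering the
--     # most uncovered cells), written recursively with max/index over a counts list
--     if not uncovered:
--         return []
--     counts = [bin(m & uncovered).count('1') for m in rect_masks]
--     best = max(counts)
--     if best == 0:
--         return []
--     i = counts.index(best)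
--     return [rectangles[i]] + _greedy(rect_masks, rectangles, uncovered & ~rect_masks[i])
--
--
-- def _minimal_cover_exact(cells, rectangles):
--     if not cells:
--         return []
--     cell_index = {cell: i for i, cell in enumerate(cells)}
--     n = len(cells)
--     full = (1 << n) - 1
--     rect_masks = [m for m in (_mask_of(cell_index, r) for r in rectangles) if m != 0]
--     if not rect_masks:
--         return []
--     k = len(rect_masks)
--     if k > 30:
--         return _greedy(rect_masks, rectangles, full)
--     # exact search via incremental subset DP: processing mask j doubles the tables,
--     # so union/count of every subset is built from the subset without its top
--     # rectangle instead of being recomputed bit by bit.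
--     union = [0]
--     cnt = [0]
--     for rm in rect_masks:
--         union += [u | rm for u in union]
--         cnt += [c + 1 for c in cnt]
--     best = None
--     best_size = n + 1
--     for s, (u, c) in enumerate(zip(union, cnt)):
--         if u == full and (best is None or c < best_size):
--             best = s
--             best_size = c
--     if best is not None:
--         return [rectangles[i] for i in range(k) if best & (1 << i)]
--     return []
-- ===== Notes on version B (the rewrite author's own statement) =====
-- stated objective: alternative
-- what changed: The exact branch's per-subset inner loop over all k bits is replaced by an incremental subset DP that doubles the union/count tables once per rectangle, and the greedy fallback's while-loop with an inline strict-improvement scan is restructured into a recursion using a counts list with max() and list.index().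
import Mathlib
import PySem

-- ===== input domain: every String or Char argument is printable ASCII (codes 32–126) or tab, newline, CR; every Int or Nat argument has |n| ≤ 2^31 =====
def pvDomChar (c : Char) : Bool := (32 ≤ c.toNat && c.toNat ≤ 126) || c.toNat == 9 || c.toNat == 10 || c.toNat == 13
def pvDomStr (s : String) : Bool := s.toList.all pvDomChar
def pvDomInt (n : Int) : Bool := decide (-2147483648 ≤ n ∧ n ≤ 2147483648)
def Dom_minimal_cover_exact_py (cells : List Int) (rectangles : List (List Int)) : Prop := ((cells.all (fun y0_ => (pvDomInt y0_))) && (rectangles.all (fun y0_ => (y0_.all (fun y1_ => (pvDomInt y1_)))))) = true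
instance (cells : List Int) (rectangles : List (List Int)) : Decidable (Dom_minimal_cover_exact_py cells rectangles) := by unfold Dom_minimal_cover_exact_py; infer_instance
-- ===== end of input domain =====

-- B replaces A's per-subset bit-by-bit rescans by a doubling subset DP and
-- restructures the greedy fallback (k > 30) recursively with max/index; same return
-- value everywhere. All Python ints involved in masks are nonnegative, so Nat bitwise
-- operations (&&&, |||, <<<, Nat.ldiff for `x & ~y`) are exact here.

-- ===== PORT A =====
-- helpers shared by the two ports where the two Pythons have the same line
-- (cell_index comprehension, the final cover comprehension)

-- cell_index = {cell: i for i, cell in enumerate(cells)}; the enumerate index is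
-- nonnegative, stored as Nat (exact)
def pvCellIndex (cells : List Int) : PySem.Dict Int Nat :=
  (PySem.List.enumerate cells 0).foldl (fun d p => d.insert p.2 p.1.toNat) PySem.Dict.empty

-- inner loop of A: mask |= 1 << cell_index[cell] guarded by `cell in cell_index`
def pvMaskA (ci : PySem.Dict Int Nat) (rect : List Int) : Nat :=
  rect.foldl (fun m c => if ci.contains c then m ||| (1 <<< ci.getD c 0) else m) 0

-- A's rect_masks accumulation loop (append if nonzero)
def pvMasksA (ci : PySem.Dict Int Nat) (rectangles : List (List Int)) : List Nat :=
  rectangles.foldl (fun acc r => if pvMaskA ci r ≠ 0 then acc ++ [pvMaskA ci r] else acc) []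

-- `[rectangles[i] for i in range(k) if best & (1 << i)]` (same line in both Pythons)
def pvCoverOf (rects : List (List Int)) (k : Nat) (b : Nat) : List (List Int) :=
  (List.range k).foldl (fun acc i => if b &&& (1 <<< i) ≠ 0 then acc ++ [rects.getD i []] else acc) []

-- A's greedy selection loop: first index strictly improving the covered count
def pvSelA (u : Nat) (rms : List Nat) : Nat × Int :=
  (PySem.List.enumerate rms 0).foldl
    (fun st p =>
      if PySem.Int.bitCount (((p.2 &&& u : Nat) : Int)) > st.1
      then (PySem.Int.bitCount (((p.2 &&& u : Nat) : Int)), p.1) else st)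
    (0, -1)

-- termination helper: clearing at least one common bit strictly decreases `uncovered`
theorem pvLdiffLt (u m : Nat) (h : u &&& m ≠ 0) : Nat.ldiff u m < u := by
  have heq : Nat.ldiff u m = u &&& (u ^^^ m) := by
    apply Nat.eq_of_testBit_eq
    intro i
    simp only [Nat.testBit_ldiff, Nat.testBit_and, Nat.testBit_xor]
    cases u.testBit i <;> cases m.testBit i <;> rfl
  have hle : Nat.ldiff u m ≤ u := by rw [heq]; exact Nat.and_le_left
  have hne : Nat.ldiff u m ≠ u := by
    obtain ⟨i, hi⟩ := Nat.exists_testBit_of_ne_zero h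
    intro he
    have h1 : u.testBit i = true ∧ m.testBit i = true := by
      have := hi; rw [Nat.testBit_and, Bool.and_eq_true] at this; exact this
    exact absurd (congrArg (Nat.testBit · i) he) (by simp [Nat.testBit_ldiff, h1.1, h1.2])
  omega

-- membership in an enumerate list determines the indexed element
theorem pvMemEnumerate {α : Type} (d : α) :
    ∀ (l : List α) (j : Int) (p : Int × α), p ∈ PySem.List.enumerate l j →
      j ≤ p.1 ∧ l.getD (p.1 - j).toNat d = p.2 := by
  intro l
  induction l with
  | nil => intro j p hp; rw [PySem.List.enumerate_nil] at hp; cases hp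
  | cons x xs ih =>
    intro j p hp
    rw [PySem.List.enumerate_cons] at hp
    rcases List.mem_cons.mp hp with h | h
    · subst h
      refine ⟨le_refl _, ?_⟩
      show (x :: xs).getD ((j - j : Int)).toNat d = x
      have hz : ((j : Int) - j).toNat = 0 := by omega
      rw [hz]
      simp
    · obtain ⟨h1, h2⟩ := ih (j + 1) p h
      refine ⟨by omega, ?_⟩
      have : (p.1 - j).toNat = (p.1 - (j + 1)).toNat + 1 := by omega
      rw [this, List.getD_cons_succ, h2]

-- invariant of A's selection fold, used for greedy termination
theorem pvSelA_spec (u : Nat) (rms : List Nat) :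
    pvSelA u rms = (0, -1) ∨
    (0 ≤ (pvSelA u rms).2 ∧ 0 < (pvSelA u rms).1 ∧
      (pvSelA u rms).1 =
        PySem.Int.bitCount (((rms.getD (pvSelA u rms).2.toNat 0 &&& u : Nat) : Int))) := by
  unfold pvSelA
  refine List.foldlRecOn (motive := fun st => st = ((0 : Nat), (-1 : Int)) ∨
    (0 ≤ st.2 ∧ 0 < st.1 ∧
      st.1 = PySem.Int.bitCount (((rms.getD st.2.toNat 0 &&& u : Nat) : Int)))) _ _ ?_ ?_
  · exact Or.inl rfl
  · intro st hst p hp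
    by_cases hgt : PySem.Int.bitCount (((p.2 &&& u : Nat) : Int)) > st.1
    · simp only [if_pos hgt]
      right
      obtain ⟨h1, h2⟩ := pvMemEnumerate 0 rms 0 p hp
      refine ⟨h1, by omega, ?_⟩
      rw [sub_zero] at h2
      show PySem.Int.bitCount (((p.2 &&& u : Nat) : Int)) =
        PySem.Int.bitCount (((rms.getD p.1.toNat 0 &&& u : Nat) : Int))
      rw [h2]
    · simp only [if_neg hgt]
      exact hst

theorem pvSelA_ldiff_lt (u : Nat) (rms : List Nat) (h : (pvSelA u rms).2 ≠ -1) :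
    Nat.ldiff u (rms.getD (pvSelA u rms).2.toNat 0) < u := by
  rcases pvSelA_spec u rms with h0 | ⟨_, hpos, heq⟩
  · exact absurd (by rw [h0]) h
  · apply pvLdiffLt
    intro hz
    rw [Nat.and_comm] at heq
    rw [hz] at heq
    simp [PySem.Int.bitCount_zero] at heq
    omega

-- A's greedy while-loop (k > 30 branch), accumulator style
def pvGreedyA (rms : List Nat) (rects : List (List Int)) (u : Nat) (cover : List (List Int)) :
    List (List Int) :=
  if u = 0 then cover
  else
    if h : (pvSelA u rms).2 = -1 then cover
    else
      pvGreedyA rms rects (Nat.ldiff u (rms.getD (pvSelA u rms).2.toNat 0))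
        (cover ++ [rects.getD (pvSelA u rms).2.toNat []])
termination_by u
decreasing_by exact pvSelA_ldiff_lt u rms h

-- A's per-subset inner loop: mask/count accumulated bit by bit over range(k)
def pvSubsetEval (rms : List Nat) (subset : Nat) : Nat × Nat :=
  (List.range rms.length).foldl
    (fun p i => if subset &&& (1 <<< i) ≠ 0 then (p.1 ||| rms.getD i 0, p.2 + 1) else p) (0, 0)

-- A's exhaustive scan over all subsets
def pvExactScanA (rms : List Nat) (full : Nat) (n : Nat) : Option Nat × Nat :=
  (List.range (1 <<< rms.length)).foldl
    (fun st subset =>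
      if (pvSubsetEval rms subset).1 = full then
        (if st.1 = none ∨ (pvSubsetEval rms subset).2 < st.2
         then (some subset, (pvSubsetEval rms subset).2) else st)
      else st)
    (none, n + 1)

def minimal_cover_exact_py (cells : List Int) (rectangles : List (List Int)) : List (List Int) :=
  if cells = [] then []
  else
    let ci := pvCellIndex cells
    let n := cells.length
    let rms := pvMasksA ci rectangles
    if rms = [] then []
    else if 30 < rms.length then pvGreedyA rms rectangles ((1 <<< n) - 1) []
    else
      match (pvExactScanA rms ((1 <<< n) - 1) n).1 with
      | some b => pvCoverOf rectangles rms.length b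
      | none => []

-- ===== PORT B =====
-- B's _mask_of: single .get lookup
def pvMaskB (ci : PySem.Dict Int Nat) (rect : List Int) : Nat :=
  rect.foldl (fun m c => match ci.get? c with | some i => m ||| (1 <<< i) | none => m) 0

-- B's rect_masks comprehension: map then filter out zero masks
def pvMasksB (ci : PySem.Dict Int Nat) (rectangles : List (List Int)) : List Nat :=
  (rectangles.map (pvMaskB ci)).filter (fun m => m != 0)

-- termination helper for B's greedy: the indexed mask meets `uncovered`
theorem pvIndexMaskLt (u : Nat) (rms : List Nat) (best i : Nat) (hb : best ≠ 0)
    (h : PySem.List.index? (rms.map (fun m => PySem.Int.bitCount (((m &&& u : Nat) : Int)))) best =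
      some i) :
    Nat.ldiff u (rms.getD i 0) < u := by
  rw [PySem.List.index?_eq_some_iff] at h
  obtain ⟨pre, suf, hd, hlen, _⟩ := h
  have hget : (rms.map (fun m => PySem.Int.bitCount (((m &&& u : Nat) : Int))))[i]? = some best := by
    rw [hd, List.getElem?_append_right (by omega)]
    simp [hlen]
  rw [List.getElem?_map, Option.map_eq_some_iff] at hget
  obtain ⟨m, hm, hfm⟩ := hget
  have hgd : rms.getD i 0 = m := by rw [List.getD_eq_getElem?_getD, hm]; rfl
  rw [hgd]
  apply pvLdiffLt
  intro hz
  rw [Nat.and_comm] at hz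
  rw [hz] at hfm
  simp [PySem.Int.bitCount_zero] at hfm
  exact hb hfm.symm

-- B's _greedy: recursive, counts list + max + index
def pvGreedyB (rms : List Nat) (rects : List (List Int)) (u : Nat) : List (List Int) :=
  if u = 0 then []
  else
    let counts := rms.map (fun m => PySem.Int.bitCount (((m &&& u : Nat) : Int)))
    match PySem.List.max? counts (fun x => x) with
    | none => []  -- unreachable: rms is nonempty at every call site (Python max would raise)
    | some best =>
      if hb : best = 0 then []
      else
        match hidx : PySem.List.index? counts best with
        | none => []  -- unreachable: best is an element of counts
        | some i => rects.getD i [] :: pvGreedyB rms rects (Nat.ldiff u (rms.getD i 0))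
termination_by u
decreasing_by
  have hc : counts = rms.map (fun m => PySem.Int.bitCount (((m &&& u : Nat) : Int))) := by
    simp only [counts]
    exact List.attach_map_val (f := fun m => PySem.Int.bitCount (((m &&& u : Nat) : Int)))
  rw [hc] at hidx
  exact pvIndexMaskLt u rms best i hb hidx

-- B's doubling subset DP: processing one mask doubles the union/count tables
def pvDP (rms : List Nat) : List Nat × List Nat :=
  rms.foldl
    (fun p rm => (p.1 ++ p.1.map (fun x => x ||| rm), p.2 ++ p.2.map (fun c => c + 1)))
    ([0], [0])

-- B's scan: for s, (u, c) in enumerate(zip(union, cnt))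
def pvScanB (pairs : List (Nat × Nat)) (full : Nat) (n : Nat) : Option Nat × Nat :=
  (PySem.List.enumerate pairs 0).foldl
    (fun st e =>
      if e.2.1 = full then
        (if st.1 = none ∨ e.2.2 < st.2 then (some e.1.toNat, e.2.2) else st)
      else st)
    (none, n + 1)

def minimal_cover_exact_py_alt (cells : List Int) (rectangles : List (List Int)) :
    List (List Int) :=
  if cells = [] then []
  else
    let ci := pvCellIndex cells
    let n := cells.length
    let full := (1 <<< n) - 1
    let rms := pvMasksB ci rectangles
    if rms = [] then []
    else if 30 < rms.length then pvGreedyB rms rectangles full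
    else
      match (pvScanB ((pvDP rms).1.zip (pvDP rms).2) full n).1 with
      | some b => pvCoverOf rectangles rms.length b
      | none => []

-- ===== PRECONDITION & SPEC =====
def Spec_minimal_cover_exact_py (cells : List Int) (rectangles : List (List Int)) (out : List (List Int)) : Prop := out = minimal_cover_exact_py_alt cells rectangles
instance (cells : List Int) (rectangles : List (List Int)) (out : List (List Int)) : Decidable (Spec_minimal_cover_exact_py cells rectangles out) := by unfold Spec_minimal_cover_exact_py; infer_instance

-- ===== CLAIM (what is proved, stated in full; the proofs are below) =====
def Claim_equal_minimal_cover_exact_py : Prop := ∀ (cells : List Int) (rectangles : List (List Int)), Dom_minimal_cover_exact_py cells rectangles → Spec_minimal_cover_exact_py cells rectangles (minimal_cover_exact_py cells rectangles)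

-- ===== LEMMAS AND PROOFS =====

-- the two mask builders agree
theorem pvMask_eq (ci : PySem.Dict Int Nat) (r : List Int) : pvMaskB ci r = pvMaskA ci r := by
  unfold pvMaskA pvMaskB
  apply PySem.List.foldl_congr_mem
  intro acc c _
  cases h : ci.get? c with
  | none =>
    have hc : ci.contains c = false := by
      rw [PySem.Dict.contains_eq_isSome_get?, h]; rfl
    simp [hc]
  | some i =>
    have hc : ci.contains c = true := by
      rw [PySem.Dict.contains_eq_isSome_get?, h]; rfl
    have hg : ci.getD c 0 = i := by rw [PySem.Dict.getD_eq_get?_getD, h]; rfl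
    simp [hc, hg]

theorem pvMasks_eq (ci : PySem.Dict Int Nat) (rectangles : List (List Int)) :
    pvMasksB ci rectangles = pvMasksA ci rectangles := by
  unfold pvMasksA pvMasksB
  rw [PySem.List.foldl_append_ite (fun r => pvMaskA ci r ≠ 0) (pvMaskA ci)]
  rw [List.map_congr_left (fun r _ => pvMask_eq ci r), List.filter_map]
  rw [List.nil_append]
  congr 1
  apply List.filter_congr
  intro r _
  show (pvMaskA ci r != 0) = decide (pvMaskA ci r ≠ 0)
  cases pvMaskA ci r <;> simp

-- ---- greedy branch ----

-- A's selection fold, rewritten as structural recursion over the counts list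
def pvSelFold (cs : List Nat) (j : Int) (st : Nat × Int) : Nat × Int :=
  match cs with
  | [] => st
  | c :: t => pvSelFold t (j + 1) (if c > st.1 then (c, j) else st)

theorem pvSelA_eq_selFold (u : Nat) :
    ∀ (rms : List Nat) (j : Int) (st : Nat × Int),
      (PySem.List.enumerate rms j).foldl
        (fun st p =>
          if PySem.Int.bitCount (((p.2 &&& u : Nat) : Int)) > st.1
          then (PySem.Int.bitCount (((p.2 &&& u : Nat) : Int)), p.1) else st) st
      = pvSelFold (rms.map (fun m => PySem.Int.bitCount (((m &&& u : Nat) : Int)))) j st := by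
  intro rms
  induction rms with
  | nil => intro j st; rw [PySem.List.enumerate_nil]; rfl
  | cons x xs ih =>
    intro j st
    rw [PySem.List.enumerate_cons, List.foldl_cons, List.map_cons]
    rw [ih (j + 1)]
    rfl

theorem pvSelFold_no_update (cs : List Nat) :
    ∀ (j : Int) (st : Nat × Int), (∀ c ∈ cs, c ≤ st.1) → pvSelFold cs j st = st := by
  induction cs with
  | nil => intro j st _; rfl
  | cons c t ih =>
    intro j st hle
    rw [pvSelFold]
    have hc : ¬ c > st.1 := by
      have := hle c (List.mem_cons_self)
      omega
    rw [if_neg hc]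
    exact ih (j + 1) st (fun x hx => hle x (List.mem_cons_of_mem _ hx))

theorem pvSelFold_char (cs : List Nat) :
    ∀ (j : Int) (b : Nat) (idx : Int), b < cs.foldl max b →
      ∃ p : Nat, PySem.List.index? cs (cs.foldl max b) = some p ∧
        pvSelFold cs j (b, idx) = (cs.foldl max b, j + p) := by
  induction cs with
  | nil => intro j b idx hb; simp at hb
  | cons c t ih =>
    intro j b idx hb
    rw [List.foldl_cons] at hb ⊢
    rw [pvSelFold]
    by_cases hc : b < c
    · rw [if_pos (by omega)]
      have hmaxbc : max b c = c := by omega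
      rw [hmaxbc] at hb ⊢
      by_cases hM : c < t.foldl max c
      · obtain ⟨p, hp, hfold⟩ := ih (j + 1) c j hM
        refine ⟨p + 1, ?_, ?_⟩
        · have hne : c ≠ t.foldl max c := by omega
          rw [PySem.List.index?, List.idxOf?_cons]
          rw [if_neg (by simpa using hne)]
          rw [show List.idxOf? (t.foldl max c) t = PySem.List.index? t (t.foldl max c) from rfl]
          rw [hp]
          rfl
        · rw [hfold]
          refine Prod.ext rfl ?_
          show j + 1 + (p : Int) = j + ((p : Nat) + 1 : Nat)
          push_cast
          ring
      · have heq : t.foldl max c = c := by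
          have := (PySem.List.le_foldl_max t c).1
          omega
        have hall : ∀ y ∈ t, y ≤ c := by
          intro y hy
          have := (PySem.List.le_foldl_max t c).2 y hy
          omega
        refine ⟨0, ?_, ?_⟩
        · rw [heq, PySem.List.index?, List.idxOf?_cons]
          rw [if_pos (by simp)]
        · rw [pvSelFold_no_update t (j + 1) (c, j) hall, heq]
          refine Prod.ext rfl ?_
          show j = j + ((0 : Nat) : Int)
          simp
    · rw [if_neg (by omega)]
      have hmaxbc : max b c = b := by omega
      rw [hmaxbc] at hb ⊢
      obtain ⟨p, hp, hfold⟩ := ih (j + 1) b idx hb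
      refine ⟨p + 1, ?_, ?_⟩
      · have hne : c ≠ t.foldl max b := by
          have := (PySem.List.le_foldl_max t b).1
          omega
        rw [PySem.List.index?, List.idxOf?_cons]
        rw [if_neg (by simpa using hne)]
        rw [show List.idxOf? (t.foldl max b) t = PySem.List.index? t (t.foldl max b) from rfl]
        rw [hp]
        rfl
      · rw [hfold]
        refine Prod.ext rfl ?_
        show j + 1 + (p : Int) = j + ((p : Nat) + 1 : Nat)
        push_cast
        ring

theorem pvGreedy_eq (u : Nat) :
    ∀ (rms : List Nat) (rects : List (List Int)) (cover : List (List Int)), rms ≠ [] →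
      pvGreedyA rms rects u cover = cover ++ pvGreedyB rms rects u := by
  induction u using Nat.strong_induction_on with
  | _ u IH =>
  intro rms rects cover hne
  rw [pvGreedyA.eq_def, pvGreedyB.eq_def]
  by_cases hu : u = 0
  · simp [hu]
  · rw [if_neg hu, if_neg hu]
    dsimp only
    have hsel : pvSelA u rms =
        pvSelFold (rms.map (fun m => PySem.Int.bitCount (((m &&& u : Nat) : Int)))) 0 (0, -1) := by
      unfold pvSelA
      exact pvSelA_eq_selFold u rms 0 (0, -1)
    obtain ⟨c0, t0, rfl⟩ : ∃ c0 t0, rms = c0 :: t0 := by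
      cases rms with
      | nil => exact absurd rfl hne
      | cons a b => exact ⟨a, b, rfl⟩
    set f := fun m => PySem.Int.bitCount (((m &&& u : Nat) : Int)) with hf
    have hmax : PySem.List.max? ((c0 :: t0).map f) (fun x => x) =
        some ((t0.map f).foldl max (f c0)) := by
      rw [List.map_cons, PySem.List.max?_id_cons]
    set best := (t0.map f).foldl max (f c0) with hbest
    have hfold0 : ((c0 :: t0).map f).foldl max 0 = best := by
      rw [List.map_cons, List.foldl_cons]
      rw [show max 0 (f c0) = f c0 by omega]
    rw [hmax]
    dsimp only
    by_cases hb : best = 0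
    · rw [dif_pos hb]
      have hall : ∀ x ∈ (c0 :: t0).map f, x ≤ 0 := by
        intro x hx
        rcases hx with _ | hx
        · have := (PySem.List.le_foldl_max (t0.map f) (f c0)).1
          omega
        · have := (PySem.List.le_foldl_max (t0.map f) (f c0)).2 x (by assumption)
          omega
      have hA : pvSelA u (c0 :: t0) = (0, -1) := by
        rw [hsel]
        exact pvSelFold_no_update _ 0 (0, -1) hall
      rw [dif_pos (by rw [hA])]
      simp
    · rw [dif_neg hb]
      have hpos : (0 : Nat) < ((c0 :: t0).map f).foldl max 0 := by
        rw [hfold0]; omega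
      obtain ⟨p, hp, hfoldc⟩ := pvSelFold_char ((c0 :: t0).map f) 0 0 (-1) hpos
      rw [hfold0] at hp hfoldc
      have hA : pvSelA u (c0 :: t0) = (best, (p : Int)) := by
        rw [hsel, hfoldc]
        refine Prod.ext rfl ?_
        show (0 : Int) + (p : Nat) = (p : Nat)
        simp
      have hne2 : ((best, (p : Int)).2 : Int) ≠ -1 := by
        simp only []
        omega
      rw [dif_neg (by rw [hA]; exact hne2)]
      split
      · next heq => rw [hp] at heq; cases heq
      · next i heq =>
        rw [hp] at heq
        injection heq with heq
        subst heq
        have htoNat : ((pvSelA u (c0 :: t0)).2).toNat = p := by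
          rw [hA]
          exact Int.toNat_natCast p
        rw [htoNat]
        have hlt : Nat.ldiff u ((c0 :: t0).getD p 0) < u :=
          pvIndexMaskLt u (c0 :: t0) best p hb hp
        rw [IH _ hlt (c0 :: t0) rects (cover ++ [rects.getD p []]) (by simp)]
        simp

-- ---- exact branch ----

theorem pvSubsetEval_append_low (ms : List Nat) (m : Nat) (s : Nat) (hs : s < 2 ^ ms.length) :
    pvSubsetEval (ms ++ [m]) s = pvSubsetEval ms s := by
  unfold pvSubsetEval
  have hlen : (ms ++ [m]).length = ms.length + 1 := by simp
  rw [hlen, List.range_succ, List.foldl_append, List.foldl_cons, List.foldl_nil]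
  have hbit : s &&& (1 <<< ms.length) = 0 := by
    rw [Nat.one_shiftLeft, Nat.and_two_pow, Nat.testBit_lt_two_pow hs]
    simp
  rw [hbit]
  simp only [ne_eq, not_true_eq_false, if_false]
  apply PySem.List.foldl_congr_mem
  intro acc i hi
  rw [List.getD_append _ _ _ _ (List.mem_range.mp hi)]

theorem pvSubsetEval_append_high (ms : List Nat) (m : Nat) (s : Nat) (hs : s < 2 ^ ms.length) :
    pvSubsetEval (ms ++ [m]) (2 ^ ms.length + s) =
      ((pvSubsetEval ms s).1 ||| m, (pvSubsetEval ms s).2 + 1) := by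
  unfold pvSubsetEval
  have hlen : (ms ++ [m]).length = ms.length + 1 := by simp
  rw [hlen, List.range_succ, List.foldl_append, List.foldl_cons, List.foldl_nil]
  have hinner : (List.range ms.length).foldl
      (fun p i => if (2 ^ ms.length + s) &&& (1 <<< i) ≠ 0
        then (p.1 ||| (ms ++ [m]).getD i 0, p.2 + 1) else p) ((0 : Nat), (0 : Nat))
    = (List.range ms.length).foldl
      (fun p i => if s &&& (1 <<< i) ≠ 0 then (p.1 ||| ms.getD i 0, p.2 + 1) else p)
      ((0 : Nat), (0 : Nat)) := by
    apply PySem.List.foldl_congr_mem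
    intro acc i hi
    have hik : i < ms.length := List.mem_range.mp hi
    have hand : (2 ^ ms.length + s) &&& (1 <<< i) = s &&& (1 <<< i) := by
      rw [Nat.one_shiftLeft, Nat.and_two_pow, Nat.and_two_pow,
        Nat.testBit_two_pow_add_gt hik]
    rw [hand, List.getD_append _ _ _ _ hik]
  rw [hinner]
  have hbit : (2 ^ ms.length + s) &&& (1 <<< ms.length) ≠ 0 := by
    rw [Nat.one_shiftLeft, Nat.and_two_pow, Nat.testBit_two_pow_add_eq,
      Nat.testBit_lt_two_pow hs]
    have := Nat.two_pow_pos ms.length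
    simp only [Bool.not_false, Bool.toNat_true, one_mul]
    omega
  rw [if_pos hbit]
  have hgd : (ms ++ [m]).getD ms.length 0 = m := by
    rw [List.getD_eq_getElem?_getD, List.getElem?_append_right (le_refl _)]
    simp
  rw [hgd]

theorem pvDP_spec (rms : List Nat) :
    pvDP rms = ((List.range (2 ^ rms.length)).map (fun s => (pvSubsetEval rms s).1),
                (List.range (2 ^ rms.length)).map (fun s => (pvSubsetEval rms s).2)) := by
  induction rms using List.reverseRecOn with
  | nil => rfl
  | append_singleton ms m IH =>
    unfold pvDP at IH ⊢
    rw [List.foldl_append, IH, List.foldl_cons, List.foldl_nil]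
    have hlen : (ms ++ [m]).length = ms.length + 1 := by simp
    have hsplit : List.range (2 ^ (ms.length + 1)) =
        List.range (2 ^ ms.length) ++
          (List.range (2 ^ ms.length)).map (fun s => 2 ^ ms.length + s) := by
      rw [pow_succ, Nat.mul_two, List.range_add]
    rw [hlen, hsplit]
    rw [List.map_append, List.map_append, Prod.mk.injEq]
    constructor
    · rw [List.map_map, List.map_map]
      congr 1
      · exact List.map_congr_left (fun s hs =>
          (congrArg Prod.fst (pvSubsetEval_append_low ms m s (List.mem_range.mp hs))).symm)
      · apply List.map_congr_left
        intro s hs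
        show (pvSubsetEval ms s).1 ||| m = (pvSubsetEval (ms ++ [m]) (2 ^ ms.length + s)).1
        rw [pvSubsetEval_append_high ms m s (List.mem_range.mp hs)]
    · rw [List.map_map, List.map_map]
      congr 1
      · exact List.map_congr_left (fun s hs =>
          (congrArg Prod.snd (pvSubsetEval_append_low ms m s (List.mem_range.mp hs))).symm)
      · apply List.map_congr_left
        intro s hs
        show (pvSubsetEval ms s).2 + 1 = (pvSubsetEval (ms ++ [m]) (2 ^ ms.length + s)).2
        rw [pvSubsetEval_append_high ms m s (List.mem_range.mp hs)]

theorem pvEnumerate_append {α : Type} (l l' : List α) (j : Int) :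
    PySem.List.enumerate (l ++ l') j =
      PySem.List.enumerate l j ++ PySem.List.enumerate l' (j + l.length) := by
  induction l generalizing j with
  | nil => simp [PySem.List.enumerate_nil]
  | cons x xs ih =>
    rw [List.cons_append, PySem.List.enumerate_cons, ih (j + 1), PySem.List.enumerate_cons]
    have hl : j + 1 + (xs.length : Int) = j + ((x :: xs).length : Int) := by
      rw [List.length_cons]
      push_cast
      ring
    rw [List.cons_append, hl]

theorem pvEnumerate_map {α β : Type} (g : α → β) :
    ∀ (l : List α) (j : Int),
      PySem.List.enumerate (l.map g) j =
        (PySem.List.enumerate l j).map (fun p => (p.1, g p.2)) := by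
  intro l
  induction l with
  | nil => intro j; simp [PySem.List.enumerate_nil]
  | cons x xs ih =>
    intro j
    rw [List.map_cons, PySem.List.enumerate_cons, PySem.List.enumerate_cons, List.map_cons,
      ih (j + 1)]

theorem pvEnumerate_range (n : Nat) :
    PySem.List.enumerate (List.range n) 0 = (List.range n).map (fun s : Nat => (Int.ofNat s, s)) := by
  induction n with
  | zero => rfl
  | succ n ih =>
    rw [List.range_succ, pvEnumerate_append, ih, List.map_append]
    simp [PySem.List.enumerate_cons, PySem.List.enumerate_nil]

theorem pvScan_eq (rms : List Nat) (full n : Nat) :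
    pvScanB ((pvDP rms).1.zip (pvDP rms).2) full n = pvExactScanA rms full n := by
  unfold pvScanB pvExactScanA
  rw [pvDP_spec]
  dsimp only
  rw [List.zip_map', pvEnumerate_map, pvEnumerate_range, List.map_map, List.foldl_map,
    Nat.one_shiftLeft]
  apply PySem.List.foldl_congr_mem
  intro st s _
  simp

-- ===== VERDICT (by name: the statement is the Claim_ definition above) =====
theorem minimal_cover_exact_py_spec : Claim_equal_minimal_cover_exact_py := by
  intro cells rectangles _
  unfold Spec_minimal_cover_exact_py minimal_cover_exact_py minimal_cover_exact_py_alt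
  by_cases hc : cells = []
  · rw [if_pos hc, if_pos hc]
  · rw [if_neg hc, if_neg hc]
    dsimp only
    rw [pvMasks_eq]
    by_cases h0 : pvMasksA (pvCellIndex cells) rectangles = []
    · rw [if_pos h0, if_pos h0]
    · rw [if_neg h0, if_neg h0]
      by_cases h30 : 30 < (pvMasksA (pvCellIndex cells) rectangles).length
      · rw [if_pos h30, if_pos h30]
        rw [pvGreedy_eq _ _ rectangles [] h0]
        rw [List.nil_append]
      · rw [if_neg h30, if_neg h30]
        rw [pvScan_eq]
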